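-- pv_equiv track=rewrite | github.com/dnandha/firmware-patcher | patcher.py | NearestConst
-- ===== SOURCE A (Python) =====
-- def NearestConst(x):
--     n_dist, n_sign = 0xffff, 1
--     for s in range(32-8):
--         for i in range(0xff):
--             y = i << s
--             assert y <= 0xffffffff, "error while rounding"
--             dist, sign = abs(y - x), 1 if y - x >= 0 else -1
--             n_dist, n_sign = (dist, sign)\
--                 if dist < n_dist else (n_dist, n_sign)
--     return x + n_sign * n_dist
-- ===== SOURCE B (Python) =====
-- def NearestConst(x):
--     # For each shift s there is a single best multiplier (round x/2**s, halfway
--     # down, clamp to [0, 254]); collect the 24 signed offsets and pick the one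
--     # of least magnitude (earliest shift wins ties), capped at 0xffff as in A.
--     def best_delta(s):
--         p = 1 << s
--         q, r = x // p, x % p
--         i = q if 2 * r <= p else q + 1
--         return min(max(i, 0), 254) * p - x
--
--     m = min((best_delta(s) for s in range(24)), key=abs)
--     return x + m if abs(m) < 0xffff else x + 0xffff
-- ===== Notes on version B (the rewrite author's own statement) =====
-- stated objective: faster
-- what changed: A scans all 255 multipliers for each of 24 shifts with a running minimum; B computes the single best multiplier per shift in closed form (rounded floor division, halfway down, clamped to [0,254]), collects the 24 signed offsets, and selects the first offset of least magnitude with min(..., key=abs), capping the distance at 0xffff as A's initial minimum does.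
import Mathlib
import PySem

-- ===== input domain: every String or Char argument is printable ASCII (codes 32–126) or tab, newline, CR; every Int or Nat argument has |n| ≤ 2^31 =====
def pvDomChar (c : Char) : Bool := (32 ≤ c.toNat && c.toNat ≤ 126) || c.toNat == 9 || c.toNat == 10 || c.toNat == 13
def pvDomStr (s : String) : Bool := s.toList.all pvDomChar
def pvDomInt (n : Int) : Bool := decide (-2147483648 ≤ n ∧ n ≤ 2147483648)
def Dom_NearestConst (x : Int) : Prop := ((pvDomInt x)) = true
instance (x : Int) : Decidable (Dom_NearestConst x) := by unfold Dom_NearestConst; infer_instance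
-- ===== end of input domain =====

-- B replaces A's nested scan with 24 closed-form candidates selected by a single min-by-abs pass — a constant-factor speedup.

-- ===== PORT A =====
-- the Python assert `y <= 0xffffffff` never fails (max y = 254 << 23 < 2^32), so it raises on no input and is not modelled
def NearestConst (x : Int) : Int :=
  let st := (PySem.List.pyRange 0 24 1).foldl (fun (st : Int × Int) (s : Int) =>
    (PySem.List.pyRange 0 255 1).foldl (fun (st : Int × Int) (i : Int) =>
      let y := i <<< s.toNat          -- i << s ; s ∈ [0,24) so s.toNat is exact
      let dist := |y - x|
      let sign : Int := if y - x ≥ 0 then 1 else -1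
      if dist < st.1 then (dist, sign) else st) st) ((0xffff : Int), (1 : Int))
  x + st.2 * st.1

-- ===== PORT B =====
-- best_delta(s): the signed offset of the best multiple of 2^s, by rounded floor division
def pvBestDelta (x : Int) (s : Int) : Int :=
  let p : Int := (1 : Int) <<< s.toNat     -- 1 << s ; s ∈ [0,24) so s.toNat is exact
  let q := PySem.Int.floordiv x p          -- x // p
  let r := PySem.Int.mod x p               -- x % p
  let i := if 2 * r ≤ p then q else q + 1
  (min (max i 0) 254) * p - x

-- range(24) is nonempty, so Python's min always receives a value; getD's default is never used
def NearestConst_alt (x : Int) : Int :=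
  let m := (PySem.List.min? ((PySem.List.pyRange 0 24 1).map (pvBestDelta x)) (fun d => |d|)).getD 0
  if |m| < 0xffff then x + m else x + 0xffff

-- ===== PRECONDITION & SPEC =====
def Spec_NearestConst (x : Int) (out : Int) : Prop := out = NearestConst_alt x
instance (x : Int) (out : Int) : Decidable (Spec_NearestConst x out) := by unfold Spec_NearestConst; infer_instance

-- ===== CLAIM (what is proved, stated in full; the proofs are below) =====
def Claim_equal_NearestConst : Prop := ∀ (x : Int), Dom_NearestConst x → Spec_NearestConst x (NearestConst x)

-- ===== LEMMAS AND PROOFS =====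

-- A min-update fold never goes below a bound c that also bounds every candidate.
lemma pvStayGt (f g : Int → Int) (c : Int) (l : List Int) :
    ∀ st : Int × Int, c < st.1 → (∀ i ∈ l, c < f i) →
    c < (l.foldl (fun st i => if f i < st.1 then (f i, g i) else st) st).1 := by
  induction l with
  | nil => intro st h _; simpa using h
  | cons a t ih =>
    intro st hst hall
    simp only [List.foldl_cons]
    by_cases hfa : f a < st.1
    · simp only [hfa, if_pos]
      exact ih (f a, g a) (hall a (by simp)) (fun i hi => hall i (by simp [hi]))
    · simp only [hfa, if_neg, not_false_iff]
      exact ih st hst (fun i hi => hall i (by simp [hi]))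

-- A min-update fold is the identity when no candidate beats the current minimum.
lemma pvNoUpdate (f g : Int → Int) (l : List Int) :
    ∀ st : Int × Int, (∀ i ∈ l, ¬ f i < st.1) →
    l.foldl (fun st i => if f i < st.1 then (f i, g i) else st) st = st := by
  induction l with
  | nil => intro st _; rfl
  | cons a t ih =>
    intro st hall
    simp only [List.foldl_cons, hall a (by simp), if_neg, not_false_iff]
    exact ih st (fun i hi => hall i (by simp [hi]))

-- The strict-improvement fold over [0,255) ends at the first global minimiser j.
lemma pvFoldG (f g : Int → Int) (j : Int) (st : Int × Int)
    (h0 : 0 ≤ j) (h255 : j < 255)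
    (hlt : ∀ i, 0 ≤ i → i < j → f j < f i)
    (hge : ∀ i, j ≤ i → i < 255 → f j ≤ f i) :
    (PySem.List.pyRange 0 255 1).foldl
      (fun st i => if f i < st.1 then (f i, g i) else st) st
    = if f j < st.1 then (f j, g j) else st := by
  rw [PySem.List.pyRange_one_append 0 j 255 h0 (le_of_lt h255),
      PySem.List.pyRange_one_cons h255, List.foldl_append]
  by_cases hd : f j < st.1
  · have h1 : f j < ((PySem.List.pyRange 0 j 1).foldl
        (fun st i => if f i < st.1 then (f i, g i) else st) st).1 := by
      refine pvStayGt f g (f j) _ st hd ?_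
      intro i hi
      rw [PySem.List.mem_pyRange_one] at hi
      exact hlt i hi.1 hi.2
    simp only [List.foldl_cons, h1, if_pos]
    have h2 : ∀ i ∈ PySem.List.pyRange (j + 1) 255 1, ¬ f i < (f j, g j).1 := by
      intro i hi
      rw [PySem.List.mem_pyRange_one] at hi
      have := hge i (by omega) hi.2
      simp only [not_lt]
      omega
    rw [pvNoUpdate f g _ (f j, g j) h2, if_pos hd]
  · rw [not_lt] at hd
    have hj' : ¬ f j < st.1 := by omega
    have hA : ∀ i ∈ PySem.List.pyRange 0 j 1, ¬ f i < st.1 := by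
      intro i hi
      rw [PySem.List.mem_pyRange_one] at hi
      have := hlt i hi.1 hi.2
      omega
    have hB : ∀ i ∈ PySem.List.pyRange (j + 1) 255 1, ¬ f i < st.1 := by
      intro i hi
      rw [PySem.List.mem_pyRange_one] at hi
      have := hge i (by omega) hi.2
      omega
    rw [pvNoUpdate f g _ st hA, List.foldl_cons, if_neg hj', pvNoUpdate f g _ st hB]

-- distance is antitone (strictly) left of q = x // p
lemma pvDecLe (p x q r i j : Int) (hp : 0 < p) (hr0 : 0 ≤ r) (_hrp : r < p)
    (hx : q * p + r = x) (hij : i ≤ j) (hj : j ≤ q) : |j * p - x| ≤ |i * p - x| := by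
  have hjq : j * p ≤ q * p := mul_le_mul_of_nonneg_right hj (le_of_lt hp)
  have hiq : i * p ≤ j * p := mul_le_mul_of_nonneg_right hij (le_of_lt hp)
  rw [abs_of_nonpos (by omega), abs_of_nonpos (by omega)]
  omega

lemma pvDecLt (p x q r i j : Int) (hp : 0 < p) (hr0 : 0 ≤ r) (_hrp : r < p)
    (hx : q * p + r = x) (hij : i < j) (hj : j ≤ q) : |j * p - x| < |i * p - x| := by
  have hjq : j * p ≤ q * p := mul_le_mul_of_nonneg_right hj (le_of_lt hp)
  have hiq : i * p + p ≤ j * p := by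
    have : (i + 1) * p ≤ j * p := mul_le_mul_of_nonneg_right (by omega) (le_of_lt hp)
    linarith [this]
  rw [abs_of_nonpos (by omega), abs_of_nonpos (by omega)]
  omega

-- distance is monotone (strictly) right of q + 1
lemma pvIncLe (p x q r i j : Int) (hp : 0 < p) (_hr0 : 0 ≤ r) (hrp : r < p)
    (hx : q * p + r = x) (hi : q + 1 ≤ i) (hij : i ≤ j) : |i * p - x| ≤ |j * p - x| := by
  have hiq : (q + 1) * p ≤ i * p := mul_le_mul_of_nonneg_right hi (le_of_lt hp)
  have hjq : i * p ≤ j * p := mul_le_mul_of_nonneg_right hij (le_of_lt hp)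
  have h1 : (q + 1) * p = q * p + p := by ring
  rw [abs_of_nonneg (by omega), abs_of_nonneg (by omega)]
  omega

-- value at q and q+1
lemma pvValQ (p x q r : Int) (_hp : 0 < p) (hr0 : 0 ≤ r) (_hrp : r < p)
    (hx : q * p + r = x) : |q * p - x| = r := by
  rw [abs_of_nonpos (by omega)]; omega

lemma pvValQ1 (p x q r : Int) (_hp : 0 < p) (_hr0 : 0 ≤ r) (hrp : r < p)
    (hx : q * p + r = x) : |(q + 1) * p - x| = p - r := by
  have h1 : (q + 1) * p = q * p + p := by ring
  rw [abs_of_nonneg (by omega)]; omega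

-- closed-form best index: the fold over i∈[0,255) reduces to the single rounded candidate
lemma pvStepEq (x p q r : Int) (hp : 0 < p) (hr0 : 0 ≤ r) (hrp : r < p)
    (hx : q * p + r = x) (st : Int × Int) :
    (PySem.List.pyRange 0 255 1).foldl (fun st i =>
        if |i * p - x| < st.1 then (|i * p - x|, if i * p - x ≥ 0 then (1:Int) else -1)
        else st) st
    = (let i0 := if 2 * r ≤ p then q else q + 1
       let i2 := min (max i0 0) 254
       if |i2 * p - x| < st.1 then (|i2 * p - x|, if i2 * p - x ≥ 0 then (1:Int) else -1)
       else st) := by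
  by_cases hc : 2 * r ≤ p
  · simp only [if_pos hc]
    by_cases h1 : q < 0
    · have h2 : min (max q 0) 254 = 0 := by omega
      rw [h2]
      refine pvFoldG _ _ 0 st le_rfl (by norm_num) ?_ ?_
      · intro i hi0 hi; omega
      · intro i hi0 _
        exact pvIncLe p x q r 0 i hp hr0 hrp hx (by omega) hi0
    · by_cases h2 : q > 254
      · have h3 : min (max q 0) 254 = 254 := by omega
        rw [h3]
        refine pvFoldG _ _ 254 st (by norm_num) (by norm_num) ?_ ?_
        · intro i _ hi; exact pvDecLt p x q r i 254 hp hr0 hrp hx hi (by omega)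
        · intro i h254 hi255
          have : i = 254 := by omega
          rw [this]
      · have h3 : min (max q 0) 254 = q := by omega
        rw [h3]
        refine pvFoldG _ _ q st (by omega) (by omega) ?_ ?_
        · intro i hi0 hiq; exact pvDecLt p x q r i q hp hr0 hrp hx hiq le_rfl
        · intro i hqi hi255
          rcases eq_or_lt_of_le hqi with h | h
          · rw [← h]
          · calc |q * p - x| = r := pvValQ p x q r hp hr0 hrp hx
              _ ≤ p - r := by omega
              _ = |(q + 1) * p - x| := (pvValQ1 p x q r hp hr0 hrp hx).symm
              _ ≤ |i * p - x| := pvIncLe p x q r (q + 1) i hp hr0 hrp hx le_rfl (by omega)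
  · simp only [if_neg hc]
    by_cases h1 : q + 1 < 0
    · have h2 : min (max (q + 1) 0) 254 = 0 := by omega
      rw [h2]
      refine pvFoldG _ _ 0 st le_rfl (by norm_num) ?_ ?_
      · intro i hi0 hi; omega
      · intro i hi0 _
        exact pvIncLe p x q r 0 i hp hr0 hrp hx (by omega) hi0
    · by_cases h2 : q + 1 > 254
      · have h3 : min (max (q + 1) 0) 254 = 254 := by omega
        rw [h3]
        refine pvFoldG _ _ 254 st (by norm_num) (by norm_num) ?_ ?_
        · intro i _ hi; exact pvDecLt p x q r i 254 hp hr0 hrp hx hi (by omega)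
        · intro i h254 hi255
          have : i = 254 := by omega
          rw [this]
      · have h3 : min (max (q + 1) 0) 254 = q + 1 := by omega
        rw [h3]
        refine pvFoldG _ _ (q + 1) st (by omega) (by omega) ?_ ?_
        · intro i hi0 hi
          calc |(q + 1) * p - x| = p - r := pvValQ1 p x q r hp hr0 hrp hx
            _ < r := by omega
            _ = |q * p - x| := (pvValQ p x q r hp hr0 hrp hx).symm
            _ ≤ |i * p - x| := pvDecLe p x q r i q hp hr0 hrp hx (by omega) le_rfl
        · intro i hi hi255
          exact pvIncLe p x q r (q + 1) i hp hr0 hrp hx le_rfl hi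

-- A's minimum-update step, and the running first-min-by-abs of B's candidates
def pvStep (st : Int × Int) (d : Int) : Int × Int :=
  if |d| < st.1 then (|d|, if d ≥ 0 then (1:Int) else -1) else st

def pvM (d : Int) (t : List Int) : Int :=
  t.foldl (fun m x => if |x| < |m| then x else m) d

-- A's inner scan over all multipliers equals one min-update step on B's candidate.
lemma pvInnerEq (x s : Int) (st : Int × Int) :
    (PySem.List.pyRange 0 255 1).foldl (fun (st : Int × Int) (i : Int) =>
        let y := i <<< s.toNat
        let dist := |y - x|
        let sign : Int := if y - x ≥ 0 then 1 else -1
        if dist < st.1 then (dist, sign) else st) st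
    = pvStep st (pvBestDelta x s) := by
  have hp : (0:Int) < 2 ^ s.toNat := by positivity
  have hq : PySem.Int.floordiv x (2 ^ s.toNat) = x / 2 ^ s.toNat := by
    simp [PySem.Int.floordiv, Int.fdiv_eq_ediv, le_of_lt hp]
  have hr : PySem.Int.mod x (2 ^ s.toNat) = x % 2 ^ s.toNat := by
    simp [PySem.Int.mod, Int.fmod_eq_emod]
  simp only [Int.shiftLeft_eq]
  rw [pvStepEq x (2 ^ s.toNat) (x / 2 ^ s.toNat) (x % 2 ^ s.toNat) hp
    (Int.emod_nonneg _ (ne_of_gt hp)) (Int.emod_lt_of_pos _ hp)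
    (by rw [Int.emod_def]; ring) st]
  unfold pvStep pvBestDelta
  simp only [Int.shiftLeft_eq, one_mul, hq, hr]

-- |pvM d t| ≤ |d|
lemma pvMle (t : List Int) : ∀ d : Int, |pvM d t| ≤ |d| := by
  induction t with
  | nil => intro d; simp [pvM]
  | cons y t ih =>
    intro d
    simp only [pvM, List.foldl_cons]
    by_cases h : |y| < |d|
    · simp only [h, if_pos]
      exact le_of_lt (lt_of_le_of_lt (ih y) h)
    · simp only [h, if_neg, not_false_iff]
      exact ih d

-- Starting the running min from a no-better point x either never beats |d| (and the
-- run from d is stationary) or the two runs end at the same element, strictly below |d|.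
lemma pvMrel (t : List Int) : ∀ x d : Int, |d| ≤ |x| →
    (|d| ≤ |pvM x t| ∧ pvM d t = d) ∨ (pvM x t = pvM d t ∧ |pvM x t| < |d|) := by
  induction t with
  | nil => intro x d h; left; exact ⟨by simpa [pvM] using h, by simp [pvM]⟩
  | cons y t ih =>
    intro x d h
    simp only [pvM, List.foldl_cons]
    by_cases hy : |y| < |d|
    · right
      have hx : |y| < |x| := lt_of_lt_of_le hy h
      refine ⟨?_, ?_⟩
      · simp only [hy, hx, if_pos]
      · simp only [hx, if_pos]
        exact lt_of_le_of_lt (pvMle t y) hy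
    · have hd : ¬ |y| < |d| := hy
      simp only [hd, if_neg, not_false_iff]
      by_cases hx : |y| < |x|
      · simp only [hx, if_pos]
        exact ih y d (by omega)
      · simp only [hx, if_neg, not_false_iff]
        exact ih x d h

-- The strict-improvement fold over d :: t lands on the first min-by-abs element,
-- capped by the initial minimum c.
lemma pvSel (t : List Int) : ∀ (d c g : Int),
    (d :: t).foldl pvStep (c, g)
    = (let m := pvM d t
       if |m| < c then (|m|, if m ≥ 0 then (1:Int) else -1) else (c, g)) := by
  induction t with
  | nil =>
    intro d c g
    simp only [List.foldl_cons, List.foldl_nil, pvM, pvStep]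
    rfl
  | cons y t ih =>
    intro d c g
    have hcons : ∀ a : Int, pvM a (y :: t) = pvM (if |y| < |a| then y else a) t := by
      intro a; simp [pvM]
    by_cases hd : |d| < c
    · have h1 : (d :: y :: t).foldl pvStep (c, g)
          = (y :: t).foldl pvStep (|d|, if d ≥ 0 then (1:Int) else -1) := by
        simp [pvStep, hd]
      rw [h1, ih y |d| _, hcons d]
      by_cases hy : |y| < |d|
      · simp only [hy, if_pos]
        have := pvMle t y
        have hlt : |pvM y t| < c := by
          have := lt_of_le_of_lt (pvMle t y) hy; omega
        simp only [lt_of_le_of_lt (pvMle t y) hy, hlt, if_pos]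
      · simp only [hy, if_neg, not_false_iff]
        rcases pvMrel t y d (by omega) with ⟨h2, h3⟩ | ⟨h2, h3⟩
        · rw [h3]
          have : ¬ |pvM y t| < |d| := by omega
          simp only [this, if_neg, not_false_iff, hd, if_pos]
        · rw [← h2]
          have : |pvM y t| < c := by omega
          simp only [h3, this, if_pos]
    · have h1 : (d :: y :: t).foldl pvStep (c, g)
          = (y :: t).foldl pvStep (c, g) := by
        simp [pvStep, hd]
      rw [h1, ih y c g, hcons d]
      by_cases hy : |y| < |d|
      · simp only [hy, if_pos]
      · simp only [hy, if_neg, not_false_iff]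
        rcases pvMrel t y d (by omega) with ⟨h2, h3⟩ | ⟨h2, h3⟩
        · rw [h3]
          have hnb : ¬ |pvM y t| < c := by omega
          have hnd : ¬ |(d : Int)| < c := hd
          simp only [hnb, hnd, if_neg, not_false_iff]
        · rw [h2]

-- Python's min(key=abs) over a nonempty list is the running first-min fold from its head.
lemma pvMinAux : ∀ (t : List Int) (m : Int),
    PySem.List.min? (m :: t) (fun z => |z|) = some (pvM m t) := by
  intro t
  induction t with
  | nil => intro m; rfl
  | cons y t ih =>
    intro m
    have h1 : PySem.List.min? (m :: y :: t) (fun z => |z|)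
        = PySem.List.min? ((if |y| < |m| then y else m) :: t) (fun z => |z|) := by
      unfold PySem.List.min?
      simp only [List.foldl_cons]
      congr 1
      split_ifs <;> rfl
    rw [h1]
    by_cases h : |y| < |m|
    · rw [if_pos h, ih y]
      simp [pvM, h]
    · rw [if_neg h, ih m]
      simp [pvM, h]

-- ===== VERDICT (by name: the statement is the Claim_ definition above) =====
theorem NearestConst_spec : Claim_equal_NearestConst := by
  intro x _
  unfold Spec_NearestConst NearestConst NearestConst_alt
  have h : (fun (st : Int × Int) (s : Int) =>
      (PySem.List.pyRange 0 255 1).foldl (fun (st : Int × Int) (i : Int) =>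
        let y := i <<< s.toNat
        let dist := |y - x|
        let sign : Int := if y - x ≥ 0 then 1 else -1
        if dist < st.1 then (dist, sign) else st) st)
    = (fun (st : Int × Int) (s : Int) => pvStep st (pvBestDelta x s)) := by
    funext st s
    exact pvInnerEq x s st
  rw [h, ← List.foldl_map]
  have hrange : PySem.List.pyRange 0 24 1 = 0 :: PySem.List.pyRange 1 24 1 :=
    PySem.List.pyRange_one_cons (by norm_num)
  rw [hrange, List.map_cons, pvSel, pvMinAux]
  rw [Option.getD_some]
  generalize pvM (pvBestDelta x 0) (List.map (pvBestDelta x) (PySem.List.pyRange 1 24 1)) = m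
  by_cases h1 : |m| < 65535
  · simp only [h1, if_pos]
    by_cases hs : 0 ≤ m
    · rw [if_pos (by omega : m ≥ 0), abs_of_nonneg hs]; ring
    · rw [if_neg (by omega : ¬ m ≥ 0), abs_of_neg (by omega)]; ring
  · simp only [h1, if_neg, not_false_iff]
    norm_num
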